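-- pv_equiv track=rewrite | github.com/AvaTar-ArTs/AVATARARTS | 00_ACTIVE/DEVELOPMENT/UTILITIES_TOOLS/organization-tools/downloads_categorizer.py | categorize_by_keywords
-- ===== SOURCE A (Python) =====
-- def categorize_by_keywords(projects):
--     """Suggest categories based on directory names"""
--     categories = {
--         'tutorials': [],
--         'tools': [],
--         'projects': [],
--         'datasets': [],
--         'frameworks': [],
--         'automation': [],
--         'web': [],
--         'ai_ml': [],
--         'uncategorized': []
--     }
--
--     # Keywords for categorization
--     tutorial_keywords = ['course', 'tutorial', 'learn', 'example', 'demo', 'practice']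
--     tool_keywords = ['tool', 'util', 'script', 'helper', 'cli']
--     project_keywords = ['app', 'project', 'site', 'service', 'platform']
--     dataset_keywords = ['data', 'dataset', 'csv', 'analysis']
--     framework_keywords = ['django', 'flask', 'fastapi', 'react', 'vue', 'framework']
--     automation_keywords = ['automation', 'bot', 'scraper', 'crawler']
--     web_keywords = ['web', 'api', 'backend', 'frontend', 'server']
--     ai_keywords = ['ai', 'ml', 'machine-learning', 'neural', 'model', 'openai', 'llm']
--
--     for dir_name, files in projects.items():
--         dir_lower = dir_name.lower()
--
--         if any(kw in dir_lower for kw in tutorial_keywords):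
--             categories['tutorials'].append((dir_name, len(files)))
--         elif any(kw in dir_lower for kw in ai_keywords):
--             categories['ai_ml'].append((dir_name, len(files)))
--         elif any(kw in dir_lower for kw in framework_keywords):
--             categories['frameworks'].append((dir_name, len(files)))
--         elif any(kw in dir_lower for kw in automation_keywords):
--             categories['automation'].append((dir_name, len(files)))
--         elif any(kw in dir_lower for kw in web_keywords):
--             categories['web'].append((dir_name, len(files)))
--         elif any(kw in dir_lower for kw in tool_keywords):
--             categories['tools'].append((dir_name, len(files)))
--         elif any(kw in dir_lower for kw in project_keywords):
--             categories['projects'].append((dir_name, len(files)))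
--         elif any(kw in dir_lower for kw in dataset_keywords):
--             categories['datasets'].append((dir_name, len(files)))
--         else:
--             categories['uncategorized'].append((dir_name, len(files)))
--
--     return categories
-- ===== SOURCE B (Python) =====
-- # B: recursive partition cascade ("sieve") over the priority rule list — each
-- # step splits the remaining directories into matched (that category) and rest,
-- # recursing on the rest; the final dict is then assembled in A's key order.
--
-- _KEY_ORDER = ['tutorials', 'tools', 'projects', 'datasets', 'frameworks',
--               'automation', 'web', 'ai_ml', 'uncategorized']
--
-- _RULES = [
--     ('tutorials', ['course', 'tutorial', 'learn', 'example', 'demo', 'practice']),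
--     ('ai_ml', ['ai', 'ml', 'machine-learning', 'neural', 'model', 'openai', 'llm']),
--     ('frameworks', ['django', 'flask', 'fastapi', 'react', 'vue', 'framework']),
--     ('automation', ['automation', 'bot', 'scraper', 'crawler']),
--     ('web', ['web', 'api', 'backend', 'frontend', 'server']),
--     ('tools', ['tool', 'util', 'script', 'helper', 'cli']),
--     ('projects', ['app', 'project', 'site', 'service', 'platform']),
--     ('datasets', ['data', 'dataset', 'csv', 'analysis']),
-- ]
--
--
-- def _sieve(rules, remaining):
--     """Partition cascade: peel off the first rule's matches, recurse on the rest."""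
--     if not rules:
--         return [('uncategorized', [(d, n) for d, n, _ in remaining])]
--     (name, kws), rest_rules = rules[0], rules[1:]
--     matched = [(d, n) for d, n, dl in remaining
--                if any(kw in dl for kw in kws)]
--     rest = [t for t in remaining
--             if not any(kw in t[2] for kw in kws)]
--     return [(name, matched)] + _sieve(rest_rules, rest)
--
--
-- def categorize_by_keywords(projects):
--     """Suggest categories based on directory names"""
--     remaining = [(d, len(f), d.lower()) for d, f in projects.items()]
--     buckets = dict(_sieve(_RULES, remaining))
--     return {cat: buckets[cat] for cat in _KEY_ORDER}
-- ===== Notes on version B (the rewrite author's own statement) =====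
-- stated objective: alternative
-- what changed: Replaces A's per-directory elif chain mutating a dict with a recursive partition cascade over the priority rule list: each step splits the remaining directories into that rule's matches and the rest and recurses on the rest, so a directory is only ever tested against rules that did not already claim it; the dict is assembled afterwards in A's key order.
import Mathlib
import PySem

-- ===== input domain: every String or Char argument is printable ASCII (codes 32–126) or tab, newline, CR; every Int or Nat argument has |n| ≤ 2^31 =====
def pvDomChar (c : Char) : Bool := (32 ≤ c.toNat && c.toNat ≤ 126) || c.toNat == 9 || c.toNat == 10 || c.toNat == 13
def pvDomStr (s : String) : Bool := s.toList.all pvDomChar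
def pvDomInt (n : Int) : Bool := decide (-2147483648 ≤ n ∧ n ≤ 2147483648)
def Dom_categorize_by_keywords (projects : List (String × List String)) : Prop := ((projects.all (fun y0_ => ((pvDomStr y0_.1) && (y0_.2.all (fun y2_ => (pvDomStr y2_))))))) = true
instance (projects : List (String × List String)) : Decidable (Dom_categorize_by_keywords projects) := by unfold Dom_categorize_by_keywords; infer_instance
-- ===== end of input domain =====

-- B replaces A's per-directory elif chain that mutates a dict with a recursive
-- partition cascade over the priority rule list (each step splits the remaining
-- directories into that rule's matches and the rest, recursing on the rest),
-- then assembles the dict in A's key order; alternative structure, same values.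

-- ===== PORT A =====
-- keyword lists (module-level constants of Source A; Source B carries them inside _RULES)
def kwTutorial : List String := ["course", "tutorial", "learn", "example", "demo", "practice"]
def kwTool : List String := ["tool", "util", "script", "helper", "cli"]
def kwProject : List String := ["app", "project", "site", "service", "platform"]
def kwDataset : List String := ["data", "dataset", "csv", "analysis"]
def kwFramework : List String := ["django", "flask", "fastapi", "react", "vue", "framework"]
def kwAutomation : List String := ["automation", "bot", "scraper", "crawler"]
def kwWeb : List String := ["web", "api", "backend", "frontend", "server"]
def kwAi : List String := ["ai", "ml", "machine-learning", "neural", "model", "openai", "llm"]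

-- any(kw in dir_lower for kw in kws)
def kwHit (kws : List String) (dl : String) : Bool := kws.any (fun kw => PySem.Str.isIn kw dl)

-- A's initial dict literal (same key order)
def initCats : PySem.Dict String (List (String × Int)) :=
  PySem.Dict.ofList [("tutorials", []), ("tools", []), ("projects", []), ("datasets", []),
    ("frameworks", []), ("automation", []), ("web", []), ("ai_ml", []), ("uncategorized", [])]

-- one loop iteration of A: the if/elif chain; categories[k].append((dir_name, len(files)))
def stepA (cats : PySem.Dict String (List (String × Int))) (p : String × List String) :
    PySem.Dict String (List (String × Int)) :=
  let dl := PySem.Str.lower p.1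
  let x : String × Int := (p.1, (p.2.length : Int))
  if kwHit kwTutorial dl then cats.modify "tutorials" [] (· ++ [x])
  else if kwHit kwAi dl then cats.modify "ai_ml" [] (· ++ [x])
  else if kwHit kwFramework dl then cats.modify "frameworks" [] (· ++ [x])
  else if kwHit kwAutomation dl then cats.modify "automation" [] (· ++ [x])
  else if kwHit kwWeb dl then cats.modify "web" [] (· ++ [x])
  else if kwHit kwTool dl then cats.modify "tools" [] (· ++ [x])
  else if kwHit kwProject dl then cats.modify "projects" [] (· ++ [x])
  else if kwHit kwDataset dl then cats.modify "datasets" [] (· ++ [x])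
  else cats.modify "uncategorized" [] (· ++ [x])

def categorize_by_keywords (projects : List (String × List String)) : List (String × List (String × Int)) :=
  (projects.foldl stepA initCats).items

-- ===== PORT B =====
-- _RULES (priority order) and _KEY_ORDER of Source B
def catRules : List (String × List String) :=
  [("tutorials", kwTutorial), ("ai_ml", kwAi), ("frameworks", kwFramework),
   ("automation", kwAutomation), ("web", kwWeb), ("tools", kwTool),
   ("projects", kwProject), ("datasets", kwDataset)]

def keyOrder : List String :=
  ["tutorials", "tools", "projects", "datasets", "frameworks", "automation", "web", "ai_ml", "uncategorized"]

-- _sieve: partition cascade, recursion on the rule list with the shrinking remaining list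
def sieveB : List (String × List String) → List (String × Int × String) → List (String × List (String × Int))
  | [], remaining => [("uncategorized", remaining.map (fun t => (t.1, t.2.1)))]
  | r :: rs, remaining =>
      (r.1, (remaining.filter (fun t => kwHit r.2 t.2.2)).map (fun t => (t.1, t.2.1)))
        :: sieveB rs (remaining.filter (fun t => !kwHit r.2 t.2.2))

def categorize_by_keywords_alt (projects : List (String × List String)) : List (String × List (String × Int)) :=
  let remaining : List (String × Int × String) :=
    projects.map (fun p => (p.1, (p.2.length : Int), PySem.Str.lower p.1))
  let buckets := sieveB catRules remaining
  -- next(v for k, v in buckets if k == cat); the none branch is unreachable (sieveB emits all 9 keys)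
  keyOrder.map (fun c => (c, match buckets.find? (fun kv => kv.1 == c) with
                             | some kv => kv.2
                             | none => []))

-- ===== PRECONDITION & SPEC =====
def Spec_categorize_by_keywords (projects : List (String × List String)) (out : List (String × List (String × Int))) : Prop := out = categorize_by_keywords_alt projects
instance (projects : List (String × List String)) (out : List (String × List (String × Int))) : Decidable (Spec_categorize_by_keywords projects out) := by unfold Spec_categorize_by_keywords; infer_instance

-- ===== CLAIM (what is proved, stated in full; the proofs are below) =====
def Claim_equal_categorize_by_keywords : Prop := ∀ (projects : List (String × List String)), Dom_categorize_by_keywords projects → Spec_categorize_by_keywords projects (categorize_by_keywords projects)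

-- ===== LEMMAS AND PROOFS =====

-- proof-only helper: the category A's elif chain picks for a lowered name
def assignCat (dl : String) : String :=
  match catRules.find? (fun r => kwHit r.2 dl) with
  | some r => r.1
  | none => "uncategorized"

-- A's elif chain performs exactly one append, at the first-matching-rule category.
theorem stepA_eq_modify (cats : PySem.Dict String (List (String × Int))) (p : String × List String) :
    stepA cats p = cats.modify (assignCat (PySem.Str.lower p.1)) [] (· ++ [(p.1, (p.2.length : Int))]) := by
  unfold stepA assignCat catRules
  simp only [List.find?_cons]
  split_ifs <;> simp_all

theorem assignCat_mem_keyOrder (dl : String) : assignCat dl ∈ keyOrder := by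
  unfold assignCat
  cases h : catRules.find? (fun r => kwHit r.2 dl) with
  | none => simp [keyOrder]
  | some r =>
    have hr : r ∈ catRules := List.mem_of_find?_eq_some h
    fin_cases hr <;> simp [keyOrder]

-- Set.update adds nothing when every new element is already present.
theorem set_update_of_subset {s : List String} (l : List String) (h : ∀ x ∈ l, x ∈ s) :
    PySem.Set.update s l = s := by
  induction l generalizing s with
  | nil => rfl
  | cons a t ih =>
    have ha : a ∈ s := h a (by simp)
    have hadd : PySem.Set.add s a = s := by
      simp [PySem.Set.add, ha]
    have : PySem.Set.update s (a :: t) = PySem.Set.update (PySem.Set.add s a) t := rfl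
    rw [this, hadd]
    exact ih (fun x hx => h x (by simp [hx]))

-- A's result, characterised category-major over the labelled directory list.
theorem A_char (projects : List (String × List String)) :
    categorize_by_keywords projects =
      keyOrder.map (fun c => (c,
        ((projects.map (fun p => (assignCat (PySem.Str.lower p.1), (p.1, (p.2.length : Int))))).filter
          (fun l => l.1 == c)).map (·.2))) := by
  unfold categorize_by_keywords
  set labels : List (String × (String × Int)) :=
    projects.map (fun p => (assignCat (PySem.Str.lower p.1), (p.1, (p.2.length : Int)))) with hlabels
  have hfold : projects.foldl stepA initCats =
      labels.foldl (fun d q => d.modify q.1 [] (· ++ [q.2])) initCats := by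
    rw [hlabels, List.foldl_map]
    apply PySem.List.foldl_congr_mem
    intro d p _
    exact stepA_eq_modify d p
  rw [hfold]
  set D := labels.foldl (fun d q => d.modify q.1 [] (· ++ [q.2])) initCats with hD
  have hkeys0 : initCats.keys = keyOrder := by decide
  have hmem : ∀ x ∈ labels.map Prod.fst, x ∈ keyOrder := by
    intro x hx
    rw [hlabels] at hx
    simp only [List.map_map, List.mem_map] at hx
    obtain ⟨p, -, hp⟩ := hx
    exact hp ▸ assignCat_mem_keyOrder _
  have hkeys : D.keys = keyOrder := by
    rw [hD, PySem.Dict.keys_foldl_modify_key, hkeys0]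
    exact set_update_of_subset _ hmem
  have hnodup : D.keys.Nodup := by rw [hkeys]; decide
  rw [PySem.Dict.items_eq_map_keys D hnodup [], hkeys]
  refine List.map_congr_left (fun c _ => ?_)
  have hentry : D.getD c [] = initCats.getD c [] ++ (labels.filter (fun p => p.1 == c)).map (·.2) := by
    rw [hD]; exact PySem.Dict.getD_foldl_modify_append _ _ _
  have hinit : initCats.getD c [] = [] := by
    have hmk : initCats = PySem.Dict.mk [("tutorials", []), ("tools", []), ("projects", []),
        ("datasets", []), ("frameworks", []), ("automation", []), ("web", []), ("ai_ml", []),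
        ("uncategorized", [])] := by decide
    rw [hmk]
    simp only [PySem.Dict.getD_eq_get?_getD, PySem.Dict.get?_mk_cons]
    split_ifs <;> rfl
  rw [hentry, hinit, List.nil_append]

-- the elif chain written out as nested ifs
theorem assignCat_eq_ite (dl : String) :
    assignCat dl =
      if kwHit kwTutorial dl then "tutorials"
      else if kwHit kwAi dl then "ai_ml"
      else if kwHit kwFramework dl then "frameworks"
      else if kwHit kwAutomation dl then "automation"
      else if kwHit kwWeb dl then "web"
      else if kwHit kwTool dl then "tools"
      else if kwHit kwProject dl then "projects"
      else if kwHit kwDataset dl then "datasets"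
      else "uncategorized" := by
  unfold assignCat catRules
  simp only [List.find?_cons]
  split_ifs <;> simp_all

-- ===== VERDICT (by name: the statement is the Claim_ definition above) =====
set_option maxHeartbeats 2000000 in
theorem categorize_by_keywords_spec : Claim_equal_categorize_by_keywords := by
  intro projects _
  unfold Spec_categorize_by_keywords categorize_by_keywords_alt
  rw [A_char]
  simp only [sieveB, catRules]
  refine List.map_congr_left ?_
  intro c hc
  fin_cases hc <;>
  · refine Prod.ext rfl ?_
    simp only [List.find?_cons, String.reduceBEq, beq_self_eq_true,
      List.filter_map, List.map_map, List.filter_filter]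
    refine congrArg _ (List.filter_congr fun p _ => ?_)
    simp only [Function.comp_apply]
    rw [assignCat_eq_ite]
    split_ifs <;> simp_all
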